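-- pv_equiv track=rewrite | github.com/michelecafagna26/vl-shap | semshap/core.py | bouncing_range
-- ===== SOURCE A (Python) =====
-- def bouncing_range(n):
--     """
--     Generate a list of int form 0-n with alternate indexes. Ex: 0, n, 1, n-1, 2, n-2, ...
--     """
--     j = 0
--     items = []
--     for i in range(n + 1):
--
--         if i % 2 == 0:
--             items += [n - j]
--
--         else:
--             items += [j]
--             j += 1
--
--     return items
-- ===== SOURCE B (Python) =====
-- def bouncing_range(n):
--     """
--     Generate a list of int form 0-n with alternate indexes. Ex: 0, n, 1, n-1, 2, n-2, ...
--     """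
--     items = [0] * (n + 1)
--     items[0::2] = range(n, n - len(items[0::2]), -1)
--     items[1::2] = range(0, len(items[1::2]))
--     return items
-- ===== Notes on version B (the rewrite author's own statement) =====
-- stated objective: faster
-- what changed: Replaces A's per-element loop with its j accumulator and parity branch by preallocating the list and bulk-assigning the two strided slices from two ranges (descending values at even positions, ascending at odd).
import Mathlib
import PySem

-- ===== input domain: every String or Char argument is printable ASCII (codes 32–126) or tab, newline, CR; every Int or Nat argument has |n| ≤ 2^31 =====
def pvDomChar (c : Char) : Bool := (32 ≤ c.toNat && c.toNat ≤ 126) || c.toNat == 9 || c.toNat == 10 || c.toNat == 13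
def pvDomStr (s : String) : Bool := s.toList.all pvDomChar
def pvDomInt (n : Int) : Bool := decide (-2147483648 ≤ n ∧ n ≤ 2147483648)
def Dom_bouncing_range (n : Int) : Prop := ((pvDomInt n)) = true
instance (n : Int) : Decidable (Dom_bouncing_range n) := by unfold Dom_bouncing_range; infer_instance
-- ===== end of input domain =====

-- B builds the result by two whole-slice assignments from ranges instead of A's per-element loop; same O(n) cost, different shape.

-- ===== PORT A =====
-- loop state (j, items); 'for i in range(n + 1)' with the i % 2 branch, appending one element per step
def bouncing_range (n : Int) : List Int :=
  ((PySem.List.pyRange 0 (n + 1) 1).foldl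
    (fun (st : Int × List Int) i =>
      if PySem.Int.mod i 2 == 0 then (st.1, st.2 ++ [n - st.1])
      else (st.1 + 1, st.2 ++ [st.1]))
    (0, [])).2

-- ===== PORT B =====
-- items[0::2] = range(n, n - e, -1); items[1::2] = range(0, o): the two strided slice
-- assignments land the ranges at alternating positions, which is exactly 'interleave'
-- (for n < 0 both slice lengths are 0 and both ranges are empty, as in Python).
def interleave : List Int → List Int → List Int
  | [], ys => ys
  | x :: xs, ys => x :: interleave ys xs
termination_by xs ys => xs.length + ys.length

def bouncing_range_alt (n : Int) : List Int :=
  let e := PySem.Int.floordiv (n + 2) 2   -- len(items[0::2]) for the list [0]*(n+1)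
  let o := PySem.Int.floordiv (n + 1) 2   -- len(items[1::2])
  interleave (PySem.List.pyRange n (n - e) (-1)) (PySem.List.pyRange 0 o 1)

-- ===== PRECONDITION & SPEC =====
def Spec_bouncing_range (n : Int) (out : List Int) : Prop := out = bouncing_range_alt n
instance (n : Int) (out : List Int) : Decidable (Spec_bouncing_range n out) := by unfold Spec_bouncing_range; infer_instance

-- ===== CLAIM (what is proved, stated in full; the proofs are below) =====
def Claim_equal_bouncing_range : Prop := ∀ (n : Int), Dom_bouncing_range n → Spec_bouncing_range n (bouncing_range n)

-- ===== LEMMAS AND PROOFS =====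

-- the element at position i of the result, in closed form
def pvElem (n : Int) (i : Nat) : Int := if i % 2 = 0 then n - (i / 2 : Nat) else ((i / 2 : Nat) : Int)

lemma foldA_char (n : Int) (N : Nat) :
    ((PySem.List.pyRange 0 (N : Int) 1).foldl
      (fun (st : Int × List Int) i =>
        if PySem.Int.mod i 2 == 0 then (st.1, st.2 ++ [n - st.1])
        else (st.1 + 1, st.2 ++ [st.1]))
      (0, [])) = (((N / 2 : Nat) : Int), (List.range N).map (pvElem n)) := by
  induction N with
  | zero => simp [PySem.List.pyRange_one_eq_nil]
  | succ N ih =>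
    have h : PySem.List.pyRange 0 ((N + 1 : Nat) : Int) 1
        = PySem.List.pyRange 0 (N : Int) 1 ++ [(N : Int)] := by
      push_cast
      exact PySem.List.pyRange_one_succ_right (by positivity)
    rw [h, List.foldl_append, ih]
    simp only [List.foldl]
    have hmod : PySem.Int.mod (N : Int) 2 = ((N % 2 : Nat) : Int) := by
      exact_mod_cast PySem.Int.mod_natCast N 2
    rcases Nat.even_or_odd N with he | ho
    · have h2 : N % 2 = 0 := Nat.even_iff.mp he
      have : (PySem.Int.mod (N : Int) 2 == 0) = true := by rw [hmod, h2]; rfl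
      rw [this]
      simp only [if_true, List.range_succ, List.map_append, List.map]
      rw [Prod.mk.injEq]
      constructor
      · congr 1; omega
      · simp [pvElem, h2]
    · have h2 : N % 2 = 1 := Nat.odd_iff.mp ho
      have : (PySem.Int.mod (N : Int) 2 == 0) = false := by rw [hmod, h2]; rfl
      rw [this]
      simp only [Bool.false_eq_true, if_false, List.range_succ, List.map_append, List.map]
      rw [Prod.mk.injEq]
      constructor
      · push_cast; omega
      · simp only [pvElem, h2]; norm_num

lemma interleave_char (N : Nat) : ∀ (a b : Int),
    interleave ((List.range ((N + 1) / 2)).map (fun k : Nat => a - (k : Int)))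
               ((List.range (N / 2)).map (fun k : Nat => b + (k : Int)))
      = (List.range N).map (fun i => if i % 2 = 0 then a - (i / 2 : Nat) else b + (i / 2 : Nat)) := by
  induction N using Nat.twoStepInduction with
  | zero => intro a b; simp [interleave]
  | one => intro a b; simp [interleave]
  | more N ih _ =>
    intro a b
    have he : (N + 2 + 1) / 2 = (N + 1) / 2 + 1 := by omega
    have ho : (N + 2) / 2 = N / 2 + 1 := by omega
    rw [he, ho, List.range_succ_eq_map, List.range_succ_eq_map, List.map_cons, List.map_cons]
    rw [interleave, interleave]
    have hx : (List.map (fun k : Nat => a - (k : Int)) (List.map Nat.succ (List.range ((N + 1) / 2))))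
        = (List.range ((N + 1) / 2)).map (fun k : Nat => (a - 1) - (k : Int)) := by
      rw [List.map_map]; apply List.map_congr_left; intro k _; simp; ring
    have hy : (List.map (fun k : Nat => b + (k : Int)) (List.map Nat.succ (List.range (N / 2))))
        = (List.range (N / 2)).map (fun k : Nat => (b + 1) + (k : Int)) := by
      rw [List.map_map]; apply List.map_congr_left; intro k _; simp; ring
    rw [hx, hy, ih (a - 1) (b + 1)]
    have hr : List.range (N + 2) = 0 :: 1 :: (List.range N).map (fun i => i + 2) := by
      rw [List.range_succ_eq_map, List.range_succ_eq_map]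
      simp only [List.map_cons, List.map_map, Nat.succ_eq_add_one]
      refine congrArg₂ List.cons rfl (congrArg₂ List.cons rfl ?_)
      apply List.map_congr_left
      intro k _
      simp [Function.comp]
    rw [hr, List.map_cons, List.map_cons, List.map_map]
    refine congrArg₂ List.cons (by norm_num) (congrArg₂ List.cons (by norm_num) ?_)
    apply List.map_congr_left
    intro i _
    simp only [Function.comp_apply]
    by_cases hp : i % 2 = 0 <;> simp [hp, Nat.add_mod_right] <;> omega

lemma fd_eq (a : Int) : PySem.Int.floordiv a 2 = a / 2 :=
  PySem.Int.floordiv_eq_ediv_of_pos (by norm_num)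

theorem bouncing_range_spec : Claim_equal_bouncing_range := by
  intro n _
  unfold Spec_bouncing_range bouncing_range bouncing_range_alt
  simp only [fd_eq]
  by_cases hn : n < 0
  · -- empty on both sides
    rw [PySem.List.pyRange_one_eq_nil (by omega)]
    have h1 : PySem.List.pyRange n (n - (n + 2) / 2) (-1) = [] :=
      PySem.List.pyRange_neg_one_eq_nil (by omega)
    have h2 : PySem.List.pyRange 0 ((n + 1) / 2) 1 = [] :=
      PySem.List.pyRange_one_eq_nil (by omega)
    rw [h1, h2]
    simp [interleave]
  · rw [Int.not_lt] at hn
    obtain ⟨N, hN⟩ : ∃ N : Nat, n = (N : Int) := ⟨n.toNat, by omega⟩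
    subst hN
    have hA : ((N : Int) + 1) = ((N + 1 : Nat) : Int) := by push_cast; ring
    rw [hA, foldA_char]
    have he : ((N : Int) - ((N : Int) + 2) / 2) = (N : Int) - ((N + 2) / 2 : Nat) := by
      push_cast [Int.natCast_div]; ring_nf
    have hee : (N + 2) / 2 = (N + 1 + 1) / 2 := by omega
    have ho : (((N + 1 : Nat) : Int)) / 2 = (((N + 1) / 2 : Nat) : Int) := by omega
    rw [he, hee, ho]
    rw [PySem.List.pyRange_neg_one]
    have hlen : (((N : Int)) - ((N : Int) - ((N + 1 + 1) / 2 : Nat))).toNat = (N + 1 + 1) / 2 := by omega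
    rw [hlen]
    rw [PySem.List.pyRange_one]
    have hlen2 : ((((N + 1) / 2 : Nat) : Int) - 0).toNat = (N + 1) / 2 := by omega
    rw [hlen2]
    rw [interleave_char (N + 1) (N : Int) 0]
    apply List.map_congr_left
    intro i _
    simp [pvElem]
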